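-- pv_equiv track=rewrite | github.com/maimon33/ranger-bot | source/ranger.py | create_short_instances_dict
-- ===== SOURCE A (Python) =====
-- def create_short_instances_dict(all_instances_dictionary,
--                                 execute_action,
--                                 service=False):
--     instance_dict ={}
--
--     for region in all_instances_dictionary.items():
--         instances_ids_list = []
--         stopped_instances_ids = []
--         running_instances_ids = []
--         managed_instances_ids = []
--
--         for instance in region[1]:
--             if instance['ranger state'] == "excluded":
--                 continue
--
--             if instance['State'] == "running" and \
--                 instance['ranger state'] != "managed":
--                 running_instances_ids.append(instance["_ID"])
--
--             if instance['State'] in ["running", "stopped"] and \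
--                 instance['ranger state'] == "managed":
--                 managed_instances_ids.append(instance["_ID"])
--
--             if instance['State'] == "stopped":
--                 stopped_instances_ids.append(instance["_ID"])
--
--         if service:
--             instance_dict[region[0]] = managed_instances_ids
--         else:
--             if execute_action == "start":
--                 instances_ids_list = managed_instances_ids + \
--                                      stopped_instances_ids
--                 instance_dict[region[0]] = instances_ids_list
--             if execute_action == "stop":
--                 instances_ids_list = managed_instances_ids + \
--                                      running_instances_ids
--                 instance_dict[region[0]] = instances_ids_list
--             if execute_action == "terminate":
--                 instances_ids_list  = managed_instances_ids + \
--                                       running_instances_ids + \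
--                                       stopped_instances_ids
--             instance_dict[region[0]] = instances_ids_list
--
--     return instance_dict
-- ===== SOURCE B (Python) =====
-- def create_short_instances_dict(all_instances_dictionary,
--                                 execute_action,
--                                 service=False):
--     def buckets(instances):
--         live = [(i["State"], i["ranger state"], i)
--                 for i in instances if i["ranger state"] != "excluded"]
--         managed = [i["_ID"] for s, r, i in live
--                    if s in ("running", "stopped") and r == "managed"]
--         running = [i["_ID"] for s, r, i in live
--                    if s == "running" and r != "managed"]
--         stopped = [i["_ID"] for s, r, i in live if s == "stopped"]
--         return managed, running, stopped
--
--     def select(managed, running, stopped):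
--         if service:
--             return managed
--         table = {"start": managed + stopped,
--                  "stop": managed + running,
--                  "terminate": managed + running + stopped}
--         return table.get(execute_action, [])
--
--     return {name: select(*buckets(instances))
--             for name, instances in all_instances_dictionary.items()}
-- ===== Notes on version B (the rewrite author's own statement) =====
-- stated objective: idiomatic
-- what changed: A's single four-branch per-instance loop with mutable accumulator lists and a sequential if-reassignment chain (with its redundant double dict assignment) is replaced by three declarative filtered comprehensions over the non-excluded instances plus a dispatch-table lookup keyed by execute_action.
-- outside the precondition, e.g. on create_short_instances_dict({'r': [{'State': 'running'}]}, 'start', False): A raises KeyError, B raises KeyError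
import Mathlib
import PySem

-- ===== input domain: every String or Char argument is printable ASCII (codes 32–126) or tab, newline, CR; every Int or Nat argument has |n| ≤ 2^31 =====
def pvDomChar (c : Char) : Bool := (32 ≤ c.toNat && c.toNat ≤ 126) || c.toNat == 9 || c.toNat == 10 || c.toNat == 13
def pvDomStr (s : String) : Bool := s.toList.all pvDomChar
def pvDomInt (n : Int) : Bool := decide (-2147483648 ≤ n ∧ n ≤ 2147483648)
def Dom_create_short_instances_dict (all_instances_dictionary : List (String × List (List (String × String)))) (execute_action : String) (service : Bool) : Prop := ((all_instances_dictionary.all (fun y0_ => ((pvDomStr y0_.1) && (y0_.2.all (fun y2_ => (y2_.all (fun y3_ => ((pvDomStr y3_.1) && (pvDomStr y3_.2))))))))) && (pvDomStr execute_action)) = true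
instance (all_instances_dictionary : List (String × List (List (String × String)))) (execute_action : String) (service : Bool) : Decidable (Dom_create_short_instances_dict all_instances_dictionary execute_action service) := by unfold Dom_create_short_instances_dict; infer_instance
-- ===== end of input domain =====

-- B recomputes the same per-region id lists with three filtered comprehensions and a dispatch table
-- instead of A's four-branch per-instance loop and sequential if-reassignment chain (objective: idiomatic).


-- ===== PORT A =====
-- instance[k] : exact under Pre_ (which guarantees the key is present wherever A reads it)
def aGet (inst : List (String × String)) (k : String) : String :=
  (PySem.Dict.ofList inst).getD k ""

-- the inner for-loop's state: (running_instances_ids, managed_instances_ids, stopped_instances_ids)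
def aStep (st : List String × List String × List String) (instdata : List (String × String)) :
    List String × List String × List String :=
  if aGet instdata "ranger state" == "excluded" then st
  else
    let st :=
      if aGet instdata "State" == "running" && !(aGet instdata "ranger state" == "managed")
      then (st.1 ++ [aGet instdata "_ID"], st.2.1, st.2.2) else st
    let st :=
      if (aGet instdata "State" == "running" || aGet instdata "State" == "stopped")
          && aGet instdata "ranger state" == "managed"
      then (st.1, st.2.1 ++ [aGet instdata "_ID"], st.2.2) else st
    if aGet instdata "State" == "stopped"
    then (st.1, st.2.1, st.2.2 ++ [aGet instdata "_ID"]) else st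

def create_short_instances_dict (all_instances_dictionary : List (String × List (List (String × String)))) (execute_action : String) (service : Bool) : List (String × List String) :=
  ((all_instances_dictionary |> PySem.Dict.ofList).items.foldl (fun instance_dict region =>
      let instances_ids_list : List String := []
      let st := region.2.foldl aStep ([], [], [])
      let running_instances_ids := st.1
      let managed_instances_ids := st.2.1
      let stopped_instances_ids := st.2.2
      if service then instance_dict.insert region.1 managed_instances_ids
      else
        let p :=
          if execute_action == "start" then
            let instances_ids_list := managed_instances_ids ++ stopped_instances_ids
            (instances_ids_list, instance_dict.insert region.1 instances_ids_list)
          else (instances_ids_list, instance_dict)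
        let p :=
          if execute_action == "stop" then
            let instances_ids_list := managed_instances_ids ++ running_instances_ids
            (instances_ids_list, p.2.insert region.1 instances_ids_list)
          else p
        let instances_ids_list :=
          if execute_action == "terminate" then
            managed_instances_ids ++ running_instances_ids ++ stopped_instances_ids
          else p.1
        p.2.insert region.1 instances_ids_list)
    PySem.Dict.empty).items

-- ===== PORT B =====
def bLook (inst : List (String × String)) (key : String) : String :=
  ((PySem.Dict.ofList inst).get? key).getD ""

-- (managed, running, stopped) id lists, each a filtered comprehension over the non-excluded instances
def bBuckets (instances : List (List (String × String))) :
    List String × List String × List String :=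
  let live := (instances.filter (fun i => !(bLook i "ranger state" == "excluded"))).map
      (fun i => (bLook i "State", bLook i "ranger state", i))
  ((live.filter (fun t => (t.1 == "running" || t.1 == "stopped") && t.2.1 == "managed")).map
      (fun t => bLook t.2.2 "_ID"),
   (live.filter (fun t => t.1 == "running" && !(t.2.1 == "managed"))).map
      (fun t => bLook t.2.2 "_ID"),
   (live.filter (fun t => t.1 == "stopped")).map (fun t => bLook t.2.2 "_ID"))

def bSelect (execute_action : String) (service : Bool) (managed running stopped : List String) :
    List String :=
  if service then managed
  else
    ((PySem.Dict.ofList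
        [("start", managed ++ stopped),
         ("stop", managed ++ running),
         ("terminate", managed ++ running ++ stopped)]).get? execute_action).getD []

def create_short_instances_dict_alt (all_instances_dictionary : List (String × List (List (String × String)))) (execute_action : String) (service : Bool) : List (String × List String) :=
  (PySem.Dict.ofList all_instances_dictionary).items.map (fun p =>
    let b := bBuckets p.2
    (p.1, bSelect execute_action service b.1 b.2.1 b.2.2))

-- ===== PRECONDITION & SPEC =====
-- key requirements of one instance dict, exactly as A reads them
def pvInstOK (inst : List (String × String)) : Bool :=
  let d := PySem.Dict.ofList inst
  d.contains "ranger state" &&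
    (d.getD "ranger state" "" == "excluded" ||
      (d.contains "State" &&
        (!(d.getD "State" "" == "running" || d.getD "State" "" == "stopped") ||
          d.contains "_ID")))

-- Pre_ excludes exactly the inputs where A raises KeyError: some instance lacks a key A reads
-- ('ranger state' always; 'State' when not excluded; '_ID' when it would be appended).
def Pre_create_short_instances_dict (all_instances_dictionary : List (String × List (List (String × String)))) (execute_action : String) (service : Bool) : Prop :=
  (all_instances_dictionary.all (fun region => region.2.all pvInstOK)) = true
instance (all_instances_dictionary : List (String × List (List (String × String)))) (execute_action : String) (service : Bool) : Decidable (Pre_create_short_instances_dict all_instances_dictionary execute_action service) := by unfold Pre_create_short_instances_dict; infer_instance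

def pvWitness_create_short_instances_dict : (List (String × List (List (String × String)))) × String × Bool :=
  ([("eu-west-1", [[("ranger state", "managed"), ("State", "running"), ("_ID", "i-1")],
                   [("ranger state", "new"), ("State", "stopped"), ("_ID", "i-2")]])], "start", false)

def Spec_create_short_instances_dict (all_instances_dictionary : List (String × List (List (String × String)))) (execute_action : String) (service : Bool) (out : List (String × List String)) : Prop := out = create_short_instances_dict_alt all_instances_dictionary execute_action service
instance (all_instances_dictionary : List (String × List (List (String × String)))) (execute_action : String) (service : Bool) (out : List (String × List String)) : Decidable (Spec_create_short_instances_dict all_instances_dictionary execute_action service out) := by unfold Spec_create_short_instances_dict; infer_instance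

-- ===== CLAIM (what is proved, stated in full; the proofs are below) =====
def Claim_equal_create_short_instances_dict : Prop := ∀ (all_instances_dictionary : List (String × List (List (String × String)))) (execute_action : String) (service : Bool), Dom_create_short_instances_dict all_instances_dictionary execute_action service → Pre_create_short_instances_dict all_instances_dictionary execute_action service → Spec_create_short_instances_dict all_instances_dictionary execute_action service (create_short_instances_dict all_instances_dictionary execute_action service)

-- ===== LEMMAS AND PROOFS =====

-- A's inner loop, started at any accumulators, appends exactly B's three bucket lists
-- (A's state order is (running, managed, stopped); bBuckets returns (managed, running, stopped)).
theorem foldl_aStep_eq (l : List (List (String × String))) (r0 m0 s0 : List String) :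
    l.foldl aStep (r0, m0, s0) =
      (r0 ++ (bBuckets l).2.1, m0 ++ (bBuckets l).1, s0 ++ (bBuckets l).2.2) := by
  induction l generalizing r0 m0 s0 with
  | nil => simp [bBuckets]
  | cons i t ih =>
    have hlook : ∀ k, aGet i k = bLook i k := by
      intro k; simp [aGet, bLook, PySem.Dict.getD_eq_get?_getD]
    simp only [List.foldl_cons]
    by_cases hex : bLook i "ranger state" == "excluded"
    · simp [aStep, bBuckets, hlook, hex, ih]
    · simp only [aStep, hlook]
      rw [if_neg hex]
      rcases hR : (bLook i "State" == "running" && !(bLook i "ranger state" == "managed")) <;>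
      rcases hM : ((bLook i "State" == "running" || bLook i "State" == "stopped") &&
          bLook i "ranger state" == "managed") <;>
      rcases hS : (bLook i "State" == "stopped") <;>
        simp [hR, hS, ih, bBuckets, hex, List.filter_cons, List.append_assoc] <;> simp_all
  
-- the per-region list A ends up storing, written with B's helpers
def fBody (ea : String) (service : Bool) (p : String × List (List (String × String))) : List String :=
  bSelect ea service (bBuckets p.2).1 (bBuckets p.2).2.1 (bBuckets p.2).2.2

-- A's outer-loop body collapses to a single insert of B's per-region value
theorem portA_eq (all_instances_dictionary : List (String × List (List (String × String))))
    (ea : String) (sv : Bool) :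
    create_short_instances_dict all_instances_dictionary ea sv =
      (((PySem.Dict.ofList all_instances_dictionary).items).foldl
        (fun acc p => acc.insert p.1 (fBody ea sv p)) PySem.Dict.empty).items := by
  unfold create_short_instances_dict
  congr 1
  congr 1
  funext acc p
  simp only [foldl_aStep_eq, List.nil_append]
  cases sv with
  | true => simp [fBody, bSelect]
  | false =>
    by_cases h1 : ea = "start"
    · subst h1
      simp [fBody, bSelect, PySem.Dict.ofList, PySem.Dict.update, PySem.Dict.get?_insert,
        PySem.Dict.insert_insert_self]
    · by_cases h2 : ea = "stop"
      · subst h2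
        simp [fBody, bSelect, PySem.Dict.ofList, PySem.Dict.update, PySem.Dict.get?_insert,
          PySem.Dict.insert_insert_self]
      · by_cases h3 : ea = "terminate"
        · subst h3
          simp [fBody, bSelect, PySem.Dict.ofList, PySem.Dict.update, PySem.Dict.get?_insert,
            PySem.Dict.insert_insert_self]
        · simp [fBody, bSelect, PySem.Dict.ofList, PySem.Dict.update, PySem.Dict.get?_insert,
            h1, h2, h3]

theorem create_short_instances_dict_spec : Claim_equal_create_short_instances_dict := by
  intro all ea sv _ _
  unfold Spec_create_short_instances_dict create_short_instances_dict_alt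
  rw [portA_eq]
  rw [PySem.Dict.items_foldl_insert_fresh _ _ _ _
    (by intro a _; simp [PySem.Dict.contains_empty])
    (by simpa [PySem.Dict.keys] using PySem.Dict.nodup_keys_ofList (κ := String) all)]
  simp [fBody, PySem.Dict.empty]
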